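-- pv_equiv track=rewrite | github.com/datacenter/iserver | lib/intersight/computes_summary.py | get_locator_summary
-- ===== SOURCE A (Python) =====
-- def get_locator_summary(summary, servers):
--     locator_dict = {}
--     locator_dict['On'] = 0
--     locator_dict['Off'] = 0
--
--     supported = False
--     for server in servers:
--         if 'LocatorLedOn' in server:
--             supported = True
--             if server['LocatorLedOn']:
--                 locator_dict['On'] = locator_dict['On'] + 1
--             else:
--                 locator_dict['Off'] = locator_dict['Off'] + 1
--
--     if supported:
--         summary['locator'] = locator_dict
--
--     return summary
-- ===== SOURCE B (Python) =====
-- def get_locator_summary(summary, servers):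
--     states = [s['LocatorLedOn'] for s in servers if 'LocatorLedOn' in s]
--     if states:
--         summary['locator'] = {'On': sum(1 for v in states if v),
--                               'Off': sum(1 for v in states if not v)}
--     return summary
-- ===== Notes on version B (the rewrite author's own statement) =====
-- stated objective: simpler
-- what changed: Replaces the single-pass mutable flag-and-increment loop over a pre-seeded dict with a filter-then-count decomposition: collect the LED states into a list, use its non-emptiness as the 'supported' test, and build the result dict from two counting sums.
import Mathlib
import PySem

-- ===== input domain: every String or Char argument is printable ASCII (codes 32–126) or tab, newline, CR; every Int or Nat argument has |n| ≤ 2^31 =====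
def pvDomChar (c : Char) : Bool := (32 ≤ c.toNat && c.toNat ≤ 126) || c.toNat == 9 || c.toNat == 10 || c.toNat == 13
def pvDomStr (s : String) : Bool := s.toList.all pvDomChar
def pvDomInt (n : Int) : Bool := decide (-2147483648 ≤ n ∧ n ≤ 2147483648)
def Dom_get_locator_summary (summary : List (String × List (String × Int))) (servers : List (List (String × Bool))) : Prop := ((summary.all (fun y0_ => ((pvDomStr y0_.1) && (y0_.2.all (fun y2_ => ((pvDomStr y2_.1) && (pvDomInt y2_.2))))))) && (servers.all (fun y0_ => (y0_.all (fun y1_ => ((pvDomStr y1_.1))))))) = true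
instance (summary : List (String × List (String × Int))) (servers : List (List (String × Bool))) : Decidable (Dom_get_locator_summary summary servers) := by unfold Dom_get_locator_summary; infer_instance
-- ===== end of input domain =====

-- B replaces A's flag-and-increment loop by collecting the LED states into a list,
-- testing its non-emptiness for 'supported' and counting On/Off with two passes (objective: simpler).
-- A mutates `summary` in place; the equivalence proved here is about the RETURN value.


-- ===== PORT A =====
def get_locator_summary (summary : List (String × List (String × Int))) (servers : List (List (String × Bool))) : List (String × List (String × Int)) :=
  -- locator_dict = {}; locator_dict['On'] = 0; locator_dict['Off'] = 0
  let locator0 : PySem.Dict String Int := ((PySem.Dict.empty).insert "On" 0).insert "Off" 0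
  -- supported = False; for server in servers: …
  let st := servers.foldl (fun (p : PySem.Dict String Int × Bool) server =>
      let sd : PySem.Dict String Bool := PySem.Dict.mk server
      if sd.contains "LocatorLedOn" then
        if sd.getD "LocatorLedOn" false then
          (p.1.insert "On" (p.1.getD "On" 0 + 1), true)
        else
          (p.1.insert "Off" (p.1.getD "Off" 0 + 1), true)
      else p) (locator0, false)
  -- if supported: summary['locator'] = locator_dict
  if st.2 then ((PySem.Dict.mk summary).insert "locator" st.1.items).items else summary

-- ===== PORT B =====
def get_locator_summary_alt (summary : List (String × List (String × Int))) (servers : List (List (String × Bool))) : List (String × List (String × Int)) :=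
  -- states = [s['LocatorLedOn'] for s in servers if 'LocatorLedOn' in s]
  let states : List Bool :=
    (servers.filter (fun s => (PySem.Dict.mk s).contains "LocatorLedOn")).map
      (fun s => (PySem.Dict.mk s).getD "LocatorLedOn" false)
  if states.isEmpty then summary
  else
    -- summary['locator'] = {'On': sum(1 for v in states if v), 'Off': sum(1 for v in states if not v)}
    ((PySem.Dict.mk summary).insert "locator"
      [("On", (states.countP id : Int)), ("Off", (states.countP (fun v => !v) : Int))]).items

-- ===== PRECONDITION & SPEC =====
def Spec_get_locator_summary (summary : List (String × List (String × Int))) (servers : List (List (String × Bool))) (out : List (String × List (String × Int))) : Prop := out = get_locator_summary_alt summary servers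
instance (summary : List (String × List (String × Int))) (servers : List (List (String × Bool))) (out : List (String × List (String × Int))) : Decidable (Spec_get_locator_summary summary servers out) := by unfold Spec_get_locator_summary; infer_instance

-- ===== CLAIM (what is proved, stated in full; the proofs are below) =====
def Claim_equal_get_locator_summary : Prop := ∀ (summary : List (String × List (String × Int))) (servers : List (List (String × Bool))), Dom_get_locator_summary summary servers → Spec_get_locator_summary summary servers (get_locator_summary summary servers)

-- ===== LEMMAS AND PROOFS =====

-- Loop invariant for A's fold: starting from a two-key dict [("On", on), ("Off", off)] and flag sup,
-- the fold returns the counts incremented by the On/Off counts of the collected states, and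
-- the flag ORed with the non-emptiness of the collected states.
theorem get_locator_loop (servers : List (List (String × Bool))) (on off : Int) (sup : Bool) :
    servers.foldl (fun (p : PySem.Dict String Int × Bool) server =>
      let sd : PySem.Dict String Bool := PySem.Dict.mk server
      if sd.contains "LocatorLedOn" then
        if sd.getD "LocatorLedOn" false then
          (p.1.insert "On" (p.1.getD "On" 0 + 1), true)
        else
          (p.1.insert "Off" (p.1.getD "Off" 0 + 1), true)
      else p) (PySem.Dict.mk [("On", on), ("Off", off)], sup) =
    (PySem.Dict.mk [("On", on +
        (((servers.filter (fun s => (PySem.Dict.mk s).contains "LocatorLedOn")).map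
          (fun s => (PySem.Dict.mk s).getD "LocatorLedOn" false)).countP id : Int)),
      ("Off", off +
        (((servers.filter (fun s => (PySem.Dict.mk s).contains "LocatorLedOn")).map
          (fun s => (PySem.Dict.mk s).getD "LocatorLedOn" false)).countP (fun v => !v) : Int))],
     sup || !((servers.filter (fun s => (PySem.Dict.mk s).contains "LocatorLedOn")).isEmpty)) := by
  induction servers generalizing on off sup with
  | nil => simp
  | cons s rest ih =>
    by_cases hc : (PySem.Dict.mk s).contains "LocatorLedOn"
    · by_cases hv : (PySem.Dict.mk s).getD "LocatorLedOn" false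
      · have hins : ((PySem.Dict.mk [("On", on), ("Off", off)]).insert "On"
            ((PySem.Dict.mk [("On", on), ("Off", off)]).getD "On" 0 + 1)) =
            PySem.Dict.mk [("On", on + 1), ("Off", off)] := by
          simp [PySem.Dict.insert, PySem.Dict.getD, PySem.Dict.get?, PySem.Dict.contains]
        simp only [List.foldl_cons, hc, hv, if_true, hins, ih]
        rw [List.filter_cons_of_pos (by simpa using hc)]
        simp only [List.map_cons, List.countP_cons, hv, id_eq, if_true, Bool.not_true,
          Bool.not_false, Bool.false_eq_true, if_false, add_zero,
          List.isEmpty_cons, Bool.or_true, Bool.true_or, Prod.mk.injEq,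
          PySem.Dict.mk.injEq, List.cons.injEq, and_true, true_and]
        push_cast
        omega
      · have hins : ((PySem.Dict.mk [("On", on), ("Off", off)]).insert "Off"
            ((PySem.Dict.mk [("On", on), ("Off", off)]).getD "Off" 0 + 1)) =
            PySem.Dict.mk [("On", on), ("Off", off + 1)] := by
          simp [PySem.Dict.insert, PySem.Dict.getD, PySem.Dict.get?, PySem.Dict.contains]
        simp only [List.foldl_cons, hc, hv, if_true, Bool.false_eq_true, if_false, hins, ih]
        rw [List.filter_cons_of_pos (by simpa using hc)]
        simp only [List.map_cons, List.countP_cons, hv, id_eq, if_true,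
          Bool.not_false, Bool.false_eq_true, if_false, add_zero,
          List.isEmpty_cons, Bool.or_true, Bool.true_or, Prod.mk.injEq,
          PySem.Dict.mk.injEq, List.cons.injEq, and_true, true_and]
        push_cast
        omega
    · simp only [List.foldl_cons, hc, Bool.false_eq_true, if_false, ih]
      rw [List.filter_cons_of_neg (by simpa using hc)]

theorem get_locator_summary_spec : Claim_equal_get_locator_summary := by
  intro summary servers _
  unfold Spec_get_locator_summary
  simp only [get_locator_summary, get_locator_summary_alt]
  have h0 : ((PySem.Dict.empty).insert "On" (0:Int)).insert "Off" 0 =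
      PySem.Dict.mk [("On", 0), ("Off", 0)] := by decide
  rw [h0, get_locator_loop]
  simp only [Bool.false_or, zero_add, List.isEmpty_map, List.countP_map]
  by_cases he : (List.filter (fun s => (PySem.Dict.mk s).contains "LocatorLedOn") servers).isEmpty
  · simp only [he, Bool.not_true, Bool.false_eq_true, if_false, if_true]
  · simp only [Bool.not_eq_true] at he
    simp only [he, Bool.not_false, if_true, Bool.false_eq_true, if_false]
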